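-- pv_equiv track=rewrite | github.com/whdpanda/subgen | src/subgen/core/quality/fixers.py | _best_split_2_lines
-- ===== SOURCE A (Python) =====
-- from typing import Dict, List, Optional, Tuple
--
-- def _best_split_2_lines(words: List[str], max_line_len: int) -> List[str] | None:
--     """
--     Find a split of words into 2 lines where both lines <= max_line_len.
--     Choose the split that minimizes the maximum line length (more balanced).
--     """
--     best: tuple[int, str, str] | None = None
--
--     for i in range(1, len(words)):
--         l1 = " ".join(words[:i])
--         l2 = " ".join(words[i:])
--         if len(l1) <= max_line_len and len(l2) <= max_line_len:
--             score = max(len(l1), len(l2))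
--             cand = (score, l1, l2)
--             if best is None or cand < best:
--                 best = cand
--
--     if best is None:
--         return None
--     return [best[1], best[2]]
-- ===== SOURCE B (Python) =====
-- from typing import List
--
-- def _best_split_2_lines(words: List[str], max_line_len: int) -> List[str] | None:
--     n = len(words)
--     if n < 2:
--         return None
--     lens = [len(w) for w in words]
--     total = sum(lens) + n - 1  # length of " ".join(words)
--     best_i = None
--     best_score = None
--     pre = 0  # length of " ".join(words[:i]) as i advances
--     for i in range(1, n):
--         pre += lens[i - 1] + (1 if i > 1 else 0)
--         l2 = total - pre - 1
--         if pre <= max_line_len and l2 <= max_line_len: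
--             score = pre if pre >= l2 else l2
--             if best_score is None or score < best_score:
--                 best_score = score
--                 best_i = i
--     if best_i is None:
--         return None
--     return [" ".join(words[:best_i]), " ".join(words[best_i:])]
-- ===== Notes on version B (the rewrite author's own statement) =====
-- stated objective: faster
-- what changed: B precomputes word lengths and keeps a running prefix length, so each candidate split is scored in O(1) arithmetic instead of joining both lines into strings; the two output strings are built only once for the winning split.
import Mathlib
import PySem

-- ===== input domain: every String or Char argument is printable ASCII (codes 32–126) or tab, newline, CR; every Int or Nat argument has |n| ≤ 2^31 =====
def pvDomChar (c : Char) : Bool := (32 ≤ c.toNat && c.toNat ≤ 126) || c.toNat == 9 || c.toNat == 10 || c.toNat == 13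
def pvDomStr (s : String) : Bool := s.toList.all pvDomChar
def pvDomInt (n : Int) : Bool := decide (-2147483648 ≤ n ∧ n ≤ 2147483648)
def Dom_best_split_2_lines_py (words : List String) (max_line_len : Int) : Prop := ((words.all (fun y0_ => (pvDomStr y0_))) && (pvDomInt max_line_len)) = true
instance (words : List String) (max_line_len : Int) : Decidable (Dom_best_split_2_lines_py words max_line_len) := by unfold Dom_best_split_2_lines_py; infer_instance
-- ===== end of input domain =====

-- B replaces A's per-split string building (O(n·L)) by prefix-summed line lengths,
-- building the two strings only once for the winning split (objective: faster).

-- ===== PORT A =====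
def best_split_2_lines_py (words : List String) (max_line_len : Int) : Option (List String) :=
  let best := (PySem.List.pyRange 1 (PySem.List.len words) 1).foldl
    (fun (best : Option (Int × String × String)) i =>
      let l1 := PySem.Str.join " " (PySem.List.slice words none (some i))
      let l2 := PySem.Str.join " " (PySem.List.slice words (some i) none)
      if PySem.Str.len l1 ≤ max_line_len ∧ PySem.Str.len l2 ≤ max_line_len then
        let score := max (PySem.Str.len l1) (PySem.Str.len l2)
        match best with
        | none => some (score, l1, l2)
        | some b =>
          -- Python tuple comparison cand < best, lexicographic on (score, l1, l2)
          if score < b.1 ∨ (score = b.1 ∧ (l1 < b.2.1 ∨ (l1 = b.2.1 ∧ l2 < b.2.2))) then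
            some (score, l1, l2)
          else some b
      else best) none
  match best with
  | none => none
  | some b => some [b.2.1, b.2.2]

-- ===== PORT B =====
def best_split_2_lines_py_alt (words : List String) (max_line_len : Int) : Option (List String) :=
  let n : Int := PySem.List.len words
  if n < 2 then none
  else
    let lens := words.map PySem.Str.len
    let total := lens.sum + n - 1
    let st := (PySem.List.pyRange 1 n 1).foldl
      (fun (st : Int × Option (Int × Int)) i =>
        let pre := st.1 + PySem.List.pyGetD lens (i - 1) 0 + (if 1 < i then 1 else 0)
        let l2 := total - pre - 1
        let best :=
          if pre ≤ max_line_len ∧ l2 ≤ max_line_len then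
            let score := if pre ≥ l2 then pre else l2
            match st.2 with
            | none => some (score, i)
            | some b => if score < b.1 then some (score, i) else some b
          else st.2
        (pre, best)) ((0 : Int), (none : Option (Int × Int)))
    match st.2 with
    | none => none
    | some b =>
      some [PySem.Str.join " " (PySem.List.slice words none (some b.2)),
            PySem.Str.join " " (PySem.List.slice words (some b.2) none)]

-- ===== PRECONDITION & SPEC =====
def Spec_best_split_2_lines_py (words : List String) (max_line_len : Int) (out : Option (List String)) : Prop := out = best_split_2_lines_py_alt words max_line_len
instance (words : List String) (max_line_len : Int) (out : Option (List String)) : Decidable (Spec_best_split_2_lines_py words max_line_len out) := by unfold Spec_best_split_2_lines_py; infer_instance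

-- ===== CLAIM (what is proved, stated in full; the proofs are below) =====
def Claim_equal_best_split_2_lines_py : Prop := ∀ (words : List String) (max_line_len : Int), Dom_best_split_2_lines_py words max_line_len → Spec_best_split_2_lines_py words max_line_len (best_split_2_lines_py words max_line_len)

-- ===== LEMMAS AND PROOFS =====

-- joined characters / length of " ".join(ws)
def jchars (ws : List String) : List Char := PySem.Chars.join [' '] (ws.map String.toList)
def jlen (ws : List String) : Int := ((jchars ws).length : Int)

-- A's loop body, named (definitionally the lambda in the port of A)
def fA (max_line_len : Int) (words : List String)
    (best : Option (Int × String × String)) (i : Int) : Option (Int × String × String) :=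
  let l1 := PySem.Str.join " " (PySem.List.slice words none (some i))
  let l2 := PySem.Str.join " " (PySem.List.slice words (some i) none)
  if PySem.Str.len l1 ≤ max_line_len ∧ PySem.Str.len l2 ≤ max_line_len then
    let score := max (PySem.Str.len l1) (PySem.Str.len l2)
    match best with
    | none => some (score, l1, l2)
    | some b =>
      if score < b.1 ∨ (score = b.1 ∧ (l1 < b.2.1 ∨ (l1 = b.2.1 ∧ l2 < b.2.2))) then
        some (score, l1, l2)
      else some b
  else best

-- B's loop body, named (definitionally the lambda in the port of B)
def fB (max_line_len total : Int) (lens : List Int)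
    (st : Int × Option (Int × Int)) (i : Int) : Int × Option (Int × Int) :=
  let pre := st.1 + PySem.List.pyGetD lens (i - 1) 0 + (if 1 < i then 1 else 0)
  let l2 := total - pre - 1
  let best :=
    if pre ≤ max_line_len ∧ l2 ≤ max_line_len then
      let score := if pre ≥ l2 then pre else l2
      match st.2 with
      | none => some (score, i)
      | some b => if score < b.1 then some (score, i) else some b
    else st.2
  (pre, best)

-- relation between the two loop states before processing index k
def SplitRel (words : List String) (k : Nat)
    (bestA : Option (Int × String × String)) (bestB : Option (Int × Int)) : Prop :=
  (bestA = none ∧ bestB = none) ∨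
  ∃ j : Nat, 1 ≤ j ∧ j < k ∧
    bestA = some (max (jlen (words.take j)) (jlen (words.drop j)),
                  PySem.Str.join " " (PySem.List.slice words none (some (j : Int))),
                  PySem.Str.join " " (PySem.List.slice words (some (j : Int)) none)) ∧
    bestB = some (max (jlen (words.take j)) (jlen (words.drop j)), (j : Int))

lemma jchars_cons (w : String) (ws : List String) (h : ws ≠ []) :
    jchars (w :: ws) = w.toList ++ ' ' :: jchars ws := by
  cases ws with
  | nil => exact absurd rfl h
  | cons b t => simp [jchars, PySem.Chars.join_cons_cons]

lemma jchars_append (u v : List String) (hu : u ≠ []) (hv : v ≠ []) :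
    jchars (u ++ v) = jchars u ++ ' ' :: jchars v := by
  induction u with
  | nil => exact absurd rfl hu
  | cons a t ih =>
    cases t with
    | nil =>
      rw [show ([a] ++ v : List String) = a :: v from rfl, jchars_cons a v hv]
      simp [jchars, PySem.Chars.join_singleton]
    | cons b s =>
      have h1 : (b :: s : List String) ≠ [] := by simp
      have h2 : (b :: s) ++ v ≠ [] := by simp
      rw [List.cons_append, jchars_cons a ((b :: s) ++ v) h2, jchars_cons a (b :: s) h1,
        ih h1]
      simp

lemma jlen_sum (ws : List String) (h : ws ≠ []) :
    jlen ws = (ws.map PySem.Str.len).sum + ws.length - 1 := by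
  induction ws with
  | nil => exact absurd rfl h
  | cons a t ih =>
    cases t with
    | nil => simp [jlen, jchars, PySem.Chars.join_singleton, PySem.Str.len_eq]
    | cons b s =>
      have ht : (b :: s : List String) ≠ [] := by simp
      rw [jlen, jchars_cons a (b :: s) ht]
      have := ih ht
      rw [jlen] at this
      simp only [List.length_append, List.length_cons, List.map_cons, List.sum_cons] at *
      push_cast at *
      rw [PySem.Str.len_eq]
      omega

lemma lt_append (u r : List Char) (h : r ≠ []) : u < u ++ r := by
  show List.Lex (· < ·) u (u ++ r)
  induction u with
  | nil =>
    cases r with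
    | nil => exact absurd rfl h
    | cons a t => exact List.Lex.nil
  | cons a t ih => exact List.Lex.cons ih

-- strict growth of the first line as the split point moves right
lemma l1_lt (words : List String) (j k : Nat) (h1 : 1 ≤ j) (hjk : j < k)
    (hk : k ≤ words.length) :
    PySem.Str.join " " (PySem.List.slice words none (some (j : Int))) <
    PySem.Str.join " " (PySem.List.slice words none (some (k : Int))) := by
  rw [String.lt_iff_toList_lt]
  rw [PySem.List.slice_to_natCast, PySem.List.slice_to_natCast, PySem.Str.toList_join,
    PySem.Str.toList_join]
  have hsep : (" " : String).toList = [' '] := rfl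
  rw [hsep]
  have hu : words.take j ≠ [] := by
    have : (words.take j).length = j := List.length_take_of_le (by omega)
    intro hnil; rw [hnil] at this; simp at this; omega
  have hv : (words.take k).drop j ≠ [] := by
    have : ((words.take k).drop j).length = k - j := by
      rw [List.length_drop, List.length_take_of_le hk]
    intro hnil; rw [hnil] at this; simp at this; omega
  have hsplit : words.take k = words.take j ++ (words.take k).drop j := by
    conv_lhs => rw [← List.take_append_drop j (words.take k)]
    rw [List.take_take, min_eq_left (by omega)]
  calc jchars (words.take j) < jchars (words.take j) ++ ' ' :: jchars ((words.take k).drop j) := by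
        apply lt_append; simp
    _ = jchars (words.take k) := by rw [← jchars_append _ _ hu hv, ← hsplit]

-- length bookkeeping: pre and l2 as computed by B equal the real line lengths
lemma jlen_take_one (words : List String) (h : 1 ≤ words.length) :
    jlen (words.take 1) = PySem.Str.len (words.getD 0 "") := by
  cases words with
  | nil => simp at h
  | cons a t => simp [jlen, jchars, PySem.Chars.join_singleton, PySem.Str.len_eq]

lemma jlen_take_succ (words : List String) (k : Nat) (h1 : 2 ≤ k) (hk : k ≤ words.length) :
    jlen (words.take k) = jlen (words.take (k - 1)) + PySem.Str.len (words.getD (k - 1) "") + 1 := by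
  have hk1 : k - 1 < words.length := by omega
  have hsplit : words.take k = words.take (k - 1) ++ [words.getD (k - 1) ""] := by
    rw [show k = (k - 1) + 1 by omega, List.take_add_one, List.getElem?_eq_getElem (by omega : k - 1 < words.length)]
    simp [List.getD_eq_getElem?_getD, List.getElem?_eq_getElem hk1]
  have hu : words.take (k - 1) ≠ [] := by
    have : (words.take (k - 1)).length = k - 1 := List.length_take_of_le (by omega)
    intro hnil; rw [hnil] at this; simp at this; omega
  rw [hsplit, jlen, jchars_append _ _ hu (by simp)]
  simp only [List.length_append, List.length_cons]
  have : jchars [words.getD (k - 1) ""] = (words.getD (k - 1) "").toList := by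
    simp [jchars, PySem.Chars.join_singleton]
  rw [this, jlen, PySem.Str.len_eq]
  push_cast
  omega

lemma jlen_split (words : List String) (k : Nat) (h1 : 1 ≤ k) (hk : k < words.length) :
    jlen words = jlen (words.take k) + 1 + jlen (words.drop k) := by
  have hu : words.take k ≠ [] := by
    have : (words.take k).length = k := List.length_take_of_le (by omega)
    intro hnil; rw [hnil] at this; simp at this; omega
  have hv : words.drop k ≠ [] := by
    have : (words.drop k).length = words.length - k := List.length_drop
    intro hnil; rw [hnil] at this; simp at this; omega
  conv_lhs => rw [← List.take_append_drop k words]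
  rw [jlen, jchars_append _ _ hu hv]
  simp only [List.length_append, List.length_cons]
  rw [jlen, jlen]
  push_cast
  omega

lemma str_len_join_slice (words : List String) (k : Nat) :
    PySem.Str.len (PySem.Str.join " " (PySem.List.slice words none (some (k : Int)))) =
      jlen (words.take k) := by
  rw [PySem.Str.len_eq, PySem.List.slice_to_natCast, PySem.Str.toList_join]
  rfl

lemma str_len_join_slice_from (words : List String) (k : Nat) :
    PySem.Str.len (PySem.Str.join " " (PySem.List.slice words (some (k : Int)) none)) =
      jlen (words.drop k) := by
  rw [PySem.Str.len_eq, PySem.List.slice_from_natCast, PySem.Str.toList_join]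
  rfl

-- the main loop invariant
lemma loop_eq (words : List String) (m : Int) :
    ∀ (d k : Nat), words.length - k = d → 1 ≤ k → k ≤ words.length →
    ∀ (bestA : Option (Int × String × String)) (pre : Int) (bestB : Option (Int × Int)),
    pre = (if k = 1 then 0 else jlen (words.take (k - 1))) →
    SplitRel words k bestA bestB →
    SplitRel words words.length
      ((PySem.List.pyRange (k : Int) (words.length : Int) 1).foldl (fA m words) bestA)
      (((PySem.List.pyRange (k : Int) (words.length : Int) 1).foldl
          (fB m (jlen words) (words.map PySem.Str.len)) (pre, bestB)).2) := by
  intro d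
  induction d with
  | zero =>
    intro k hd h1 hk bestA pre bestB hpre hrel
    have hkl : k = words.length := by omega
    rw [PySem.List.pyRange_one_eq_nil (by exact_mod_cast Nat.le_of_eq hkl.symm)]
    simpa [hkl] using hrel
  | succ d ih =>
    intro k hd h1 hk bestA pre bestB hpre hrel
    have hklt : k < words.length := by omega
    rw [PySem.List.pyRange_one_cons (by exact_mod_cast hklt)]
    simp only [List.foldl_cons]
    -- the updated prefix length equals jlen (words.take k)
    have hk1 : k - 1 < words.length := by omega
    have hgetD : PySem.List.pyGetD (words.map PySem.Str.len) ((k : Int) - 1) 0 =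
        PySem.Str.len (words.getD (k - 1) "") := by
      rw [show ((k : Int) - 1) = ((k - 1 : Nat) : Int) by omega, PySem.List.pyGetD_natCast]
      simp [List.getD_eq_getElem?_getD, List.getElem?_eq_getElem hk1, List.getElem?_map]
    have hpre' : pre + PySem.List.pyGetD (words.map PySem.Str.len) ((k : Int) - 1) 0 +
        (if 1 < (k : Int) then 1 else 0) = jlen (words.take k) := by
      by_cases hk1' : k = 1
      · subst hk1'
        rw [hgetD]
        simp only [hpre, if_pos]
        rw [jlen_take_one words (by omega)]
        norm_num
      · have h2 : 2 ≤ k := by omega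
        rw [hgetD, hpre, if_neg (by omega : ¬ k = 1), if_pos (by exact_mod_cast h2 : (1 : Int) < k)]
        rw [jlen_take_succ words k h2 (by omega)]
    -- B's l2 equals the real second-line length
    have hl2 : jlen words - jlen (words.take k) - 1 = jlen (words.drop k) := by
      have := jlen_split words k h1 hklt
      omega
    -- A's string lengths
    have hlen1 := str_len_join_slice words k
    have hlen2 := str_len_join_slice_from words k
    have hmax : (if jlen (words.take k) ≥ jlen (words.drop k)
          then jlen (words.take k) else jlen (words.drop k)) =
        max (jlen (words.take k)) (jlen (words.drop k)) := by
      rw [max_def]; split_ifs <;> omega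
    have stepB1 : (fB m (jlen words) (words.map PySem.Str.len) (pre, bestB) (k : Int)).1 =
        jlen (words.take k) := hpre'
    -- the two new states are related at k + 1
    have hrel' : SplitRel words (k + 1)
        (fA m words bestA (k : Int))
        (fB m (jlen words) (words.map PySem.Str.len) (pre, bestB) (k : Int)).2 := by
      by_cases hcond : jlen (words.take k) ≤ m ∧ jlen (words.drop k) ≤ m
      · rcases hrel with ⟨hA, hB⟩ | ⟨j, hj1, hjk, hA, hB⟩
        · subst hA; subst hB
          simp only [fA, fB, hpre', hlen1, hlen2, hl2, hmax, if_pos hcond]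
          exact Or.inr ⟨k, h1, by omega, rfl, rfl⟩
        · subst hA; subst hB
          simp only [fA, fB, hpre', hlen1, hlen2, hl2, hmax, if_pos hcond]
          by_cases hlt : max (jlen (words.take k)) (jlen (words.drop k)) <
              max (jlen (words.take j)) (jlen (words.drop j))
          · rw [if_pos (Or.inl hlt), if_pos hlt]
            exact Or.inr ⟨k, h1, by omega, rfl, rfl⟩
          · have hl1lt := l1_lt words j k hj1 hjk (by omega)
            rw [if_neg, if_neg hlt]
            · exact Or.inr ⟨j, hj1, by omega, rfl, rfl⟩
            · rintro (h | ⟨-, (h | ⟨he, -⟩)⟩)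
              · exact hlt h
              · exact absurd h (asymm hl1lt)
              · exact (ne_of_lt hl1lt) he.symm
      · rcases hrel with ⟨hA, hB⟩ | ⟨j, hj1, hjk, hA, hB⟩
        · subst hA; subst hB
          simp only [fA, fB, hpre', hlen1, hlen2, hl2, hmax, if_neg hcond]
          exact Or.inl ⟨rfl, rfl⟩
        · subst hA; subst hB
          simp only [fA, fB, hpre', hlen1, hlen2, hl2, hmax, if_neg hcond]
          exact Or.inr ⟨j, hj1, by omega, rfl, rfl⟩
    have hnext := ih (k + 1) (by omega) (by omega) (by omega)
      (fA m words bestA (k : Int))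
      (fB m (jlen words) (words.map PySem.Str.len) (pre, bestB) (k : Int)).1
      (fB m (jlen words) (words.map PySem.Str.len) (pre, bestB) (k : Int)).2
      (by rw [stepB1, if_neg (by omega : ¬ k + 1 = 1)]
          simp)
      hrel'
    rw [show ((k : Int) + 1) = ((k + 1 : Nat) : Int) by push_cast; ring]
    simpa using hnext

lemma portA_eq (words : List String) (m : Int) :
    best_split_2_lines_py words m =
      (match (PySem.List.pyRange 1 (PySem.List.len words) 1).foldl (fA m words) none with
       | none => none
       | some b => some [b.2.1, b.2.2]) := rfl

lemma portB_eq (words : List String) (m : Int) :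
    best_split_2_lines_py_alt words m =
      (if PySem.List.len words < 2 then none else
       match ((PySem.List.pyRange 1 (PySem.List.len words) 1).foldl
           (fB m ((words.map PySem.Str.len).sum + PySem.List.len words - 1)
             (words.map PySem.Str.len)) (0, none)).2 with
       | none => none
       | some b =>
         some [PySem.Str.join " " (PySem.List.slice words none (some b.2)),
               PySem.Str.join " " (PySem.List.slice words (some b.2) none)]) := rfl

theorem best_split_2_lines_py_spec : Claim_equal_best_split_2_lines_py := by
  intro words m _
  unfold Spec_best_split_2_lines_py
  rw [portA_eq, portB_eq, PySem.List.len_eq]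
  by_cases h2 : words.length < 2
  · rw [if_pos (by exact_mod_cast h2)]
    rw [PySem.List.pyRange_one_eq_nil (by exact_mod_cast (by omega : words.length ≤ 1))]
    rfl
  · have hne : words ≠ [] := by intro h; subst h; simp at h2
    have htotal : (words.map PySem.Str.len).sum + (words.length : Int) - 1 = jlen words := by
      rw [jlen_sum words hne]
    rw [if_neg (by exact_mod_cast h2), htotal]
    have key := loop_eq words m (words.length - 1) 1 (by omega) (by omega) (by omega)
      none 0 none (by simp) (Or.inl ⟨rfl, rfl⟩)
    rw [show ((1 : Nat) : Int) = (1 : Int) from rfl] at key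
    rcases key with ⟨hA, hB⟩ | ⟨j, hj1, hjk, hA, hB⟩
    · rw [hA, hB]
    · rw [hA, hB]
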